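-- pv_equiv track=rewrite | github.com/0xPrithviPrabhu/prithvi_RUGVED | task1/Task01P3.py | hill_number
-- ===== SOURCE A (Python) =====
-- def hill_number(n):
--     num_str = str(n)
--     length = len(num_str)
--
--     if length < 3:
--         return False
--
--     peak_found = False
--     for i in range(1, length):
--         if not peak_found:
--             if num_str[i] > num_str[i - 1]:
--                 continue
--             elif num_str[i] < num_str[i - 1]:
--                 peak_found = True
--             else:
--                 return False
--         else:
--             if num_str[i] < num_str[i - 1]:
--                 continue
--             else:
--                 return False
--
--     return peak_found
-- ===== SOURCE B (Python) =====
-- def hill_number(n):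
--     s = str(n)
--     signs = [(b > a) - (b < a) for a, b in zip(s, s[1:])]
--     return (len(s) >= 3 and 0 not in signs
--             and signs[-1] == -1
--             and signs == sorted(signs, reverse=True))
-- ===== Notes on version B (the rewrite author's own statement) =====
-- stated objective: alternative
-- what changed: Instead of A's stateful scan with a peak_found flag and early returns, B materialises the list of adjacent comparison signs (plus/zero/minus) and decides by global properties of that list: no tie sign, the final step descends, and the sign list equals its own descending sort (all ascents precede all descents).
import Mathlib
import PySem

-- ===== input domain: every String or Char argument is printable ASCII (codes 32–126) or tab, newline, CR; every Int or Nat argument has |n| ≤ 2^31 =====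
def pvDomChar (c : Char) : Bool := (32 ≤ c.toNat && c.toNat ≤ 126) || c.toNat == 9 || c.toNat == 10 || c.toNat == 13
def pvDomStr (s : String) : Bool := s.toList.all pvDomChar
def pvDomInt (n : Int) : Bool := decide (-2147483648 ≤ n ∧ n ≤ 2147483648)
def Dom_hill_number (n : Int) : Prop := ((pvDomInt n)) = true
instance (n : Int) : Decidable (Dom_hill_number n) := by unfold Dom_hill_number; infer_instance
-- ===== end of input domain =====

-- B decides "hill" by global properties of the adjacent-comparison sign list (no zero, last is -1,
-- equal to its own descending sort) instead of A's flagged left-to-right scan; return value only.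

-- ===== PORT A =====
-- the for-loop over range(1, length) with the peak_found flag and its early returns
def hillLoopA (cs : List Char) (len i : Nat) (peak : Bool) : Bool :=
  if i < len then
    let c := cs.getD i ' '
    let p := cs.getD (i - 1) ' '
    if !peak then
      if p < c then hillLoopA cs len (i + 1) peak
      else if c < p then hillLoopA cs len (i + 1) true
      else false
    else
      if c < p then hillLoopA cs len (i + 1) peak
      else false
  else peak
termination_by len - i

def hill_number (n : Int) : Bool :=
  let cs := (PySem.Int.toStr n).toList
  let length := cs.length
  if length < 3 then false
  else hillLoopA cs length 1 false

-- ===== PORT B =====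
-- signs = [(b > a) - (b < a) for a, b in zip(s, s[1:])]
def signsOf (cs : List Char) : List Int :=
  (cs.zip cs.tail).map (fun p => (if p.1 < p.2 then (1 : Int) else 0) - (if p.2 < p.1 then 1 else 0))

def hill_number_alt (n : Int) : Bool :=
  let cs := (PySem.Int.toStr n).toList
  let signs := signsOf cs
  decide (3 ≤ cs.length) && !(signs.contains 0)
    && (PySem.List.pyGet? signs (-1) == some (-1))
    && (signs == PySem.List.sorted signs (fun x => x) true)

-- ===== PRECONDITION & SPEC =====
def Spec_hill_number (n : Int) (out : Bool) : Prop := out = hill_number_alt n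
instance (n : Int) (out : Bool) : Decidable (Spec_hill_number n out) := by unfold Spec_hill_number; infer_instance

-- ===== CLAIM (what is proved, stated in full; the proofs are below) =====
def Claim_equal_hill_number : Prop := ∀ (n : Int), Dom_hill_number n → Spec_hill_number n (hill_number n)

-- ===== LEMMAS AND PROOFS =====

-- the two phases of A's loop, expressed on a sign list
def phaseDown : List Int → Bool
  | [] => true
  | s :: t => if s = -1 then phaseDown t else false

def phaseUp : List Int → Bool
  | [] => false
  | s :: t => if s = 1 then phaseUp t else if s = -1 then phaseDown t else false

theorem length_signsOf (cs : List Char) : (signsOf cs).length = cs.length - 1 := by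
  simp [signsOf, List.length_zip]

theorem mem_signsOf (cs : List Char) : ∀ x ∈ signsOf cs, x = 1 ∨ x = 0 ∨ x = -1 := by
  intro x hx
  simp only [signsOf, List.mem_map] at hx
  obtain ⟨p, _, rfl⟩ := hx
  split_ifs <;> omega

theorem getElem_signsOf (cs : List Char) (j : Nat) (h : j + 1 < cs.length) :
    (signsOf cs)[j]'(by rw [length_signsOf]; omega) =
      (if cs[j] < cs[j+1]'h then (1 : Int) else 0) - (if cs[j+1]'h < cs[j] then 1 else 0) := by
  have hz : j < (cs.zip cs.tail).length := by
    simp [List.length_zip]; omega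
  simp [signsOf, List.getElem_zip, List.getElem_tail]

theorem phaseDown_iff (l : List Int) : phaseDown l = true ↔ ∀ x ∈ l, x = -1 := by
  induction l with
  | nil => simp [phaseDown]
  | cons s t ih =>
    by_cases hs : s = -1 <;> simp [phaseDown, hs, ih]

theorem loopA_eq (cs : List Char) :
    ∀ (k i : Nat) (peak : Bool), cs.length ≤ i + k → 1 ≤ i →
      hillLoopA cs cs.length i peak =
        (if peak then phaseDown ((signsOf cs).drop (i - 1)) else phaseUp ((signsOf cs).drop (i - 1))) := by
  intro k
  induction k with
  | zero =>
    intro i peak hk hi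
    have hni : ¬ i < cs.length := by omega
    have hdrop : ((signsOf cs).drop (i - 1)) = [] := by
      apply List.drop_eq_nil_of_le
      rw [length_signsOf]; omega
    rw [hillLoopA, if_neg hni, hdrop]
    cases peak <;> simp [phaseUp, phaseDown]
  | succ k ih =>
    intro i peak hk hi
    by_cases hlt : i < cs.length
    · have hj : (i - 1) + 1 < cs.length := by omega
      have hjl : i - 1 < (signsOf cs).length := by rw [length_signsOf]; omega
      have hdrop : (signsOf cs).drop (i - 1) =
          (signsOf cs)[i - 1] :: (signsOf cs).drop (i - 1 + 1) :=
        List.drop_eq_getElem_cons hjl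
      have hii : i - 1 + 1 = i := by omega
      have hs := getElem_signsOf cs (i - 1) hj
      simp only [hii] at hdrop hs
      have hc : cs.getD i ' ' = cs[i] := List.getD_eq_getElem cs ' ' hlt
      have hp : cs.getD (i - 1) ' ' = cs[i - 1]'(by omega) := List.getD_eq_getElem cs ' ' (by omega)
      rw [hillLoopA, if_pos hlt]
      simp only [hc, hp]
      cases peak with
      | false =>
        simp only [Bool.not_false, if_pos trivial]
        by_cases h1 : cs[i - 1]'(by omega) < cs[i]
        · have hns : (signsOf cs)[i - 1]'hjl = 1 := by
            rw [hs]; simp [h1, lt_asymm h1]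
          rw [if_pos h1, ih (i + 1) false (by omega) (by omega)]
          simp [hdrop, hns, phaseUp]
        · by_cases h2 : cs[i] < cs[i - 1]'(by omega)
          · have hns : (signsOf cs)[i - 1]'hjl = -1 := by rw [hs]; simp [h1, h2]
            rw [if_neg h1, if_pos h2, ih (i + 1) true (by omega) (by omega)]
            simp [hdrop, hns, phaseUp]
          · have hns : (signsOf cs)[i - 1]'hjl = 0 := by rw [hs]; simp [h1, h2]
            rw [if_neg h1, if_neg h2]
            simp [hdrop, hns, phaseUp]
      | true =>
        simp only [Bool.not_true, if_neg Bool.false_ne_true]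
        by_cases h2 : cs[i] < cs[i - 1]'(by omega)
        · have hns : (signsOf cs)[i - 1]'hjl = -1 := by
            rw [hs]; simp [lt_asymm h2, h2]
          rw [if_pos h2, ih (i + 1) true (by omega) (by omega)]
          simp [hdrop, hns, phaseDown]
        · have hns : (signsOf cs)[i - 1]'hjl ≠ -1 := by
            rw [hs]; split_ifs <;> omega
          rw [if_neg h2]
          simp [hdrop, phaseDown, hns]
    · have hdrop : ((signsOf cs).drop (i - 1)) = [] := by
        apply List.drop_eq_nil_of_le
        rw [length_signsOf]; omega
      rw [hillLoopA, if_neg hlt, hdrop]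
      cases peak <;> simp [phaseUp, phaseDown]

theorem phaseUp_iff (l : List Int) (hl : ∀ x ∈ l, x = 1 ∨ x = 0 ∨ x = -1) :
    phaseUp l = true ↔ (¬ 0 ∈ l ∧ l.getLast? = some (-1) ∧ l.Pairwise (fun a b => b ≤ a)) := by
  induction l with
  | nil => simp [phaseUp]
  | cons s t ih =>
    have hs := hl s (List.mem_cons_self ..)
    have ht : ∀ x ∈ t, x = 1 ∨ x = 0 ∨ x = -1 := fun x hx => hl x (List.mem_cons_of_mem _ hx)
    rcases hs with rfl | rfl | rfl
    · -- s = 1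
      cases t with
      | nil => simp [phaseUp]
      | cons b t' =>
        rw [show phaseUp (1 :: b :: t') = phaseUp (b :: t') by simp [phaseUp], ih ht]
        constructor
        · rintro ⟨h0, hlast, hpw⟩
          refine ⟨by simp [h0], by simpa using hlast, ?_⟩
          refine List.Pairwise.cons ?_ hpw
          intro x hx
          rcases ht x hx with rfl | rfl | rfl <;> omega
        · rintro ⟨h0, hlast, hpw⟩
          exact ⟨fun hm => h0 (List.mem_cons_of_mem _ hm), by simpa using hlast, hpw.of_cons⟩
    · -- s = 0
      simp [phaseUp]
    · -- s = -1
      rw [show phaseUp (-1 :: t) = phaseDown t by simp [phaseUp], phaseDown_iff]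
      constructor
      · intro hall
        refine ⟨?_, ?_, ?_⟩
        · intro hm
          rcases List.mem_cons.mp hm with h | h
          · norm_num at h
          · have := hall 0 h; omega
        · cases t with
          | nil => simp
          | cons b t' =>
            have hne : (b :: t') ≠ [] := by simp
            rw [List.getLast?_cons_cons]
            rw [List.getLast?_eq_some_getLast (h := hne)]
            exact congrArg some (hall _ (List.getLast_mem hne))
        · refine List.Pairwise.cons (fun x hx => by rw [hall x hx]) ?_
          refine List.pairwise_of_forall_mem_list ?_
          intro a ha b hb
          rw [hall a ha, hall b hb]
      · rintro ⟨h0, hlast, hpw⟩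
        intro x hx
        have hle : x ≤ -1 := (List.pairwise_cons.mp hpw).1 x hx
        rcases ht x hx with rfl | rfl | rfl <;> omega

-- l == its own descending sort ↔ l is (weakly) descending
theorem eq_sorted_rev_iff (l : List Int) :
    l = PySem.List.sorted l (fun x => x) true ↔ l.Pairwise (fun a b => b ≤ a) := by
  constructor
  · intro h
    rw [h]
    exact PySem.List.sorted_pairwise_rev l (fun x => x)
  · intro h
    exact (PySem.List.sorted_rev_eq_self_of_pairwise l (fun x => x) h).symm

-- ===== VERDICT (by name: the statement is the Claim_ definition above) =====
theorem hill_number_spec : Claim_equal_hill_number := by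
  intro n _
  unfold Spec_hill_number hill_number hill_number_alt
  simp only [PySem.Int.toList_toStr]
  by_cases h : (PySem.Int.toChars n).length < 3
  · simp [h, show ¬ (3 ≤ (PySem.Int.toChars n).length) by omega]
  · set cs := PySem.Int.toChars n with hcs
    simp only [if_neg h, decide_eq_true (show 3 ≤ cs.length by omega), Bool.true_and]
    rw [loopA_eq cs cs.length 1 false (by omega) (by omega)]
    simp only [Nat.sub_self, List.drop_zero, if_neg Bool.false_ne_true]
    rw [Bool.eq_iff_iff, phaseUp_iff _ (mem_signsOf cs)]
    simp only [Bool.and_eq_true, Bool.not_eq_eq_eq_not, Bool.not_true, beq_iff_eq,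
      List.contains_eq_mem, decide_eq_false_iff_not, PySem.List.pyGet?_neg_one,
      ← eq_sorted_rev_iff]
    tauto
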